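-- pv_equiv track=rewrite | github.com/Mirco-Nani/BachBot | dataset/midi_dataset.py | generate_vocabulary
-- ===== SOURCE A (Python) =====
-- master_defaults = {
--     "time_signature.numerator": 4,
--     "time_signature.denominator": 2, # quattro quarti
--     "time_signature.clocks_per_click": 24,
--     "time_signature.notated_32nd_notes_per_beat": 8,
--     "key_signature.key" : "C", # Do maggiore
--     "set_tempo.tempo" : 500000, #120bpm
--     "ticks_per_beat" : 16,
--     "note.velocity": 64,
--     "note.channel": 0,
-- }
--
-- def generate_vocabulary(ticks_per_beat=master_defaults["ticks_per_beat"]):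
--     vocabulary = []
--
--     # note_on and note_off messages
--     for note_type in ["note_on", "note_off"]:
--         for note in range(128):
--             for time in range(ticks_per_beat):
--                 vocabulary.append(note_type + "-" + str(note) + "-" + str(time))
--
--     # special_messages
--     vocabulary.extend([
--         "WAIT_A_BEAT",
--         "START_TRACK",
--         "END_TRACK",
--         "UNKNOWN"
--     ])
--
--     encodings = dict( [ (v,i) for i,v in enumerate(vocabulary)] )
--     decodings = dict( [ (i,v) for i,v in enumerate(vocabulary)] )
--
--     return vocabulary, encodings, decodings
-- ===== SOURCE B (Python) =====
-- def generate_vocabulary(ticks_per_beat=16):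
--     # Closed form: the token at flat index i is decoded arithmetically
--     # (i -> note_type, note, time) instead of being produced by nested loops.
--     specials = ["WAIT_A_BEAT", "START_TRACK", "END_TRACK", "UNKNOWN"]
--     n = ticks_per_beat if ticks_per_beat > 0 else 0
--     total = 256 * n
--
--     def token(i):
--         if i < total:
--             q, time = divmod(i, n)
--             nt = "note_on" if q < 128 else "note_off"
--             return nt + "-" + str(q % 128) + "-" + str(time)
--         return specials[i - total]
--
--     vocabulary = [token(i) for i in range(total + 4)]
--     encodings = {v: i for i, v in enumerate(vocabulary)}
--     decodings = dict(enumerate(vocabulary))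
--     return vocabulary, encodings, decodings
-- ===== Notes on version B (the rewrite author's own statement) =====
-- stated objective: alternative
-- what changed: Replaces the three nested build loops by a closed-form index-to-token decoder: one flat comprehension over all indices computes each token arithmetically via divmod, and the two dicts come from the same enumeration.
import Mathlib
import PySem

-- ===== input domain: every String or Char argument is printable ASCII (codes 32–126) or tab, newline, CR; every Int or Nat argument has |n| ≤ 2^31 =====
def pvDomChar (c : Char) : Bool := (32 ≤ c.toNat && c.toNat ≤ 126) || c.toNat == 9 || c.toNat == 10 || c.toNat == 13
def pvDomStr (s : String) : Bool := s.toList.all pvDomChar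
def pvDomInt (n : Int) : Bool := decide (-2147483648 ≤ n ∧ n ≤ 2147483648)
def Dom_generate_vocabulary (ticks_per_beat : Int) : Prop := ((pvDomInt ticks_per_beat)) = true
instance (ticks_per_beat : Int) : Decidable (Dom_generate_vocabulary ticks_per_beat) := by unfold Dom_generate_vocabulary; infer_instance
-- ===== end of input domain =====

-- B replaces A's nested build loops by a closed-form decode: the token at flat index i
-- is computed arithmetically from i (divmod), one flat comprehension over all indices.

-- ===== PORT A =====
def generate_vocabulary (ticks_per_beat : Int) : List String × (List (String × Int)) × (List (Int × String)) :=
  -- vocabulary = [] ; nested for-loops appending note_type-note-time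
  let vocabulary : List String :=
    ["note_on", "note_off"].foldl (fun acc note_type =>
      (PySem.List.pyRange 0 128 1).foldl (fun acc note =>
        (PySem.List.pyRange 0 ticks_per_beat 1).foldl (fun acc time =>
          acc ++ [note_type ++ "-" ++ PySem.Int.toStr note ++ "-" ++ PySem.Int.toStr time]) acc) acc) []
  -- vocabulary.extend([...special messages...])
  let vocabulary := vocabulary ++ ["WAIT_A_BEAT", "START_TRACK", "END_TRACK", "UNKNOWN"]
  -- encodings = dict([(v,i) for i,v in enumerate(vocabulary)])
  let encodings : PySem.Dict String Int :=
    PySem.Dict.ofList ((PySem.List.enumerate vocabulary 0).map (fun p => (p.2, p.1)))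
  -- decodings = dict([(i,v) for i,v in enumerate(vocabulary)])
  let decodings : PySem.Dict Int String :=
    PySem.Dict.ofList (PySem.List.enumerate vocabulary 0)
  (vocabulary, encodings.items, decodings.items)

-- ===== PORT B =====
def pvSpecials : List String := ["WAIT_A_BEAT", "START_TRACK", "END_TRACK", "UNKNOWN"]

-- token(i) from Source B; specials[i - total] is always in range for the indices B uses,
-- so the total pyGetD (default never read) is an exact port there
def pvToken (n total i : Int) : String :=
  if i < total then
    let q := PySem.Int.floordiv i n
    let time := PySem.Int.mod i n
    let nt := if q < 128 then "note_on" else "note_off"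
    nt ++ "-" ++ PySem.Int.toStr (PySem.Int.mod q 128) ++ "-" ++ PySem.Int.toStr time
  else
    PySem.List.pyGetD pvSpecials (i - total) ""

def generate_vocabulary_alt (ticks_per_beat : Int) : List String × (List (String × Int)) × (List (Int × String)) :=
  let n : Int := if ticks_per_beat > 0 then ticks_per_beat else 0
  let total : Int := 256 * n
  let vocabulary : List String := (PySem.List.pyRange 0 (total + 4) 1).map (pvToken n total)
  let encodings : PySem.Dict String Int :=
    PySem.Dict.ofList ((PySem.List.enumerate vocabulary 0).map (fun p => (p.2, p.1)))
  let decodings : PySem.Dict Int String :=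
    PySem.Dict.ofList (PySem.List.enumerate vocabulary 0)
  (vocabulary, encodings.items, decodings.items)

-- ===== PRECONDITION & SPEC =====
def Spec_generate_vocabulary (ticks_per_beat : Int) (out : List String × (List (String × Int)) × (List (Int × String))) : Prop := out = generate_vocabulary_alt ticks_per_beat
instance (ticks_per_beat : Int) (out : List String × (List (String × Int)) × (List (Int × String))) : Decidable (Spec_generate_vocabulary ticks_per_beat out) := by unfold Spec_generate_vocabulary; infer_instance

-- ===== CLAIM (what is proved, stated in full; the proofs are below) =====
def Claim_equal_generate_vocabulary : Prop := ∀ (ticks_per_beat : Int), Dom_generate_vocabulary ticks_per_beat → Spec_generate_vocabulary ticks_per_beat (generate_vocabulary ticks_per_beat)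

-- ===== LEMMAS AND PROOFS =====

-- the canonical token list both vocabularies equal (m = max(ticks_per_beat, 0) as a Nat)
def pvCanon (m : Nat) : List String :=
  ((List.range 2).flatMap (fun (i : Nat) => (List.range 128).flatMap (fun (note : Nat) =>
    (List.range m).map (fun (time : Nat) =>
      (if i = 0 then "note_on" else "note_off") ++ "-" ++ PySem.Int.toStr ((note : Nat) : Int)
        ++ "-" ++ PySem.Int.toStr ((time : Nat) : Int)))))
  ++ ["WAIT_A_BEAT", "START_TRACK", "END_TRACK", "UNKNOWN"]

-- one token of B's closed form, as a singleton list (for the flatMap decomposition)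
def pvG (i note time : Nat) : List String :=
  [(if i = 0 then "note_on" else "note_off") ++ "-" ++ PySem.Int.toStr ((note : Nat) : Int)
    ++ "-" ++ PySem.Int.toStr ((time : Nat) : Int)]

-- splitting a flatMap over range (a*b) along the divmod bijection
theorem pvRangeMulFlatMap {α : Type} (a b : Nat) (F : Nat → Nat → List α) :
    (List.range (a * b)).flatMap (fun k => F (k / b) (k % b)) =
      (List.range a).flatMap (fun i => (List.range b).flatMap (F i)) := by
  induction a with
  | zero => simp
  | succ a ih =>
    rw [Nat.succ_mul, List.range_add, List.flatMap_append, ih, List.range_succ,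
      List.flatMap_append, List.flatMap_map]
    simp only [List.flatMap_cons, List.flatMap_nil, List.append_nil]
    congr 1
    rcases Nat.eq_zero_or_pos b with hb | hb
    · subst hb; simp
    refine List.flatMap_congr (fun j hj => ?_)
    have hjb : j < b := List.mem_range.mp hj
    rw [mul_comm a b, Nat.mul_add_div hb, Nat.mul_add_mod,
      Nat.div_eq_of_lt hjb, Nat.mod_eq_of_lt hjb, Nat.add_zero]

-- the divmod split applied twice: flat index -> (note_type, note, time)
theorem pvSplit (m : Nat) (G : Nat → Nat → Nat → List String) :
    (List.range (2 * (128 * m))).flatMap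
        (fun k => G (k / (128 * m)) (k % (128 * m) / m) (k % (128 * m) % m))
      = (List.range 2).flatMap (fun i => (List.range 128).flatMap (fun note =>
          (List.range m).flatMap (fun time => G i note time))) := by
  have h1 := pvRangeMulFlatMap 2 (128 * m) (fun i r => G i (r / m) (r % m))
  have h2 : ∀ i, (List.range (128 * m)).flatMap (fun r => G i (r / m) (r % m)) =
      (List.range 128).flatMap (fun note => (List.range m).flatMap (G i note)) :=
    fun i => pvRangeMulFlatMap 128 m (G i)
  exact h1.trans (by simp only [h2])

-- A's vocabulary equals the canonical token list (with m = ticks_per_beat.toNat)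
theorem pvVocabA_eq (t : Int) :
    (["note_on", "note_off"].foldl (fun acc note_type =>
      (PySem.List.pyRange 0 128 1).foldl (fun acc note =>
        (PySem.List.pyRange 0 t 1).foldl (fun acc time =>
          acc ++ [note_type ++ "-" ++ PySem.Int.toStr note ++ "-" ++ PySem.Int.toStr time]) acc) acc) [])
      ++ ["WAIT_A_BEAT", "START_TRACK", "END_TRACK", "UNKNOWN"] = pvCanon t.toNat := by
  simp only [PySem.List.foldl_append_singleton_eq_map, PySem.List.foldl_append_eq_flatMap,
    List.foldl_cons, List.foldl_nil, List.nil_append, List.append_assoc]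
  unfold pvCanon
  rw [show List.range 2 = [0, 1] by decide]
  simp [List.flatMap_cons, PySem.List.pyRange_zero, List.flatMap_map, List.map_map,
    Function.comp_def]

-- B's vocabulary equals the canonical token list
theorem pvVocabB_eq (t : Int) :
    (PySem.List.pyRange 0 (256 * (if t > 0 then t else 0) + 4) 1).map
      (pvToken (if t > 0 then t else 0) (256 * (if t > 0 then t else 0))) = pvCanon t.toNat := by
  have hn : (if t > 0 then t else 0) = ((t.toNat : Nat) : Int) := by split <;> omega
  rw [hn]
  generalize t.toNat = m
  have hN : 256 * ((m : Nat) : Int) + 4 = ((2 * (128 * m) + 4 : Nat) : Int) := by push_cast; ring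
  rw [hN, PySem.List.pyRange_zero_nat, List.map_map, List.range_add, List.map_append,
    List.map_map]
  have hmain : ∀ k ∈ List.range (2 * (128 * m)),
      [pvToken ((m : Nat) : Int) (256 * ((m : Nat) : Int)) ((k : Nat) : Int)] =
        pvG (k / (128 * m)) (k % (128 * m) / m) (k % (128 * m) % m) := by
    intro k hk
    have hk' : k < 2 * (128 * m) := List.mem_range.mp hk
    have hm0 : 0 < m := by omega
    have e1 : k / (128 * m) = k / m / 128 := by rw [Nat.div_div_eq_div_mul, Nat.mul_comm]
    have e2 : k % (128 * m) / m = k / m % 128 := by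
      rw [Nat.mul_comm]; exact Nat.mod_mul_right_div_self k m 128
    have e3 : k % (128 * m) % m = k % m := Nat.mod_mod_of_dvd k (dvd_mul_left m 128)
    have hfd : PySem.Int.floordiv ((k : Nat) : Int) ((m : Nat) : Int) = ((k / m : Nat) : Int) :=
      PySem.Int.floordiv_natCast k m
    have hmd : PySem.Int.mod ((k : Nat) : Int) ((m : Nat) : Int) = ((k % m : Nat) : Int) :=
      PySem.Int.mod_natCast k m
    have hmd128 : PySem.Int.mod ((k / m : Nat) : Int) 128 = ((k / m % 128 : Nat) : Int) := by
      exact_mod_cast PySem.Int.mod_natCast (k / m) 128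
    simp only [pvToken, pvG, hfd, hmd, hmd128]
    rw [if_pos (show ((k : Nat) : Int) < 256 * ((m : Nat) : Int) by omega), e2, e3]
    by_cases hq : k / m < 128
    · have c1 : ((k / m : Nat) : Int) < 128 := by
        simpa using (Nat.cast_lt (α := Int)).mpr hq
      have c2 : k / (128 * m) = 0 := by rw [e1]; exact Nat.div_eq_of_lt hq
      rw [if_pos c1, if_pos c2]
    · have c1 : ¬ ((k / m : Nat) : Int) < 128 := by
        simpa using (Nat.cast_le (α := Int)).mpr (Nat.le_of_not_lt hq)
      have c2 : ¬ k / (128 * m) = 0 := by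
        rw [e1]; exact fun h => hq (Nat.lt_of_div_eq_zero (by norm_num) h)
      rw [if_neg c1, if_neg c2]
  have hspec : ∀ j, j < 4 →
      pvToken ((m : Nat) : Int) (256 * ((m : Nat) : Int)) ((2 * (128 * m) + j : Nat) : Int) =
        PySem.List.pyGetD pvSpecials ((j : Nat) : Int) "" := by
    intro j hj
    simp only [pvToken]
    rw [if_neg (show ¬ ((2 * (128 * m) + j : Nat) : Int) < 256 * ((m : Nat) : Int) by
      push_cast; omega)]
    congr 1
    push_cast; ring
  unfold pvCanon
  congr 1
  · -- the message tokens
    refine (List.map_eq_flatMap.trans (List.flatMap_congr hmain)).trans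
      ((pvSplit m pvG).trans ?_)
    simp [pvG, ← List.map_eq_flatMap]
  · -- the four special tokens
    rw [show List.range 4 = [0, 1, 2, 3] by decide]
    simp only [List.map_cons, List.map_nil, Function.comp_def]
    rw [hspec 0 (by omega), hspec 1 (by omega), hspec 2 (by omega), hspec 3 (by omega)]
    rfl

theorem generate_vocabulary_eq_alt (t : Int) :
    generate_vocabulary t = generate_vocabulary_alt t := by
  simp only [generate_vocabulary, generate_vocabulary_alt]
  rw [pvVocabA_eq, pvVocabB_eq]

-- ===== VERDICT (by name: the statement is the Claim_ definition above) =====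
theorem generate_vocabulary_spec : Claim_equal_generate_vocabulary := by
  intro t _
  unfold Spec_generate_vocabulary
  exact generate_vocabulary_eq_alt t
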